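-- pv_equiv track=rewrite | github.com/Sumit-kj/PracticeProblems | src/Array/reorganize_the_array.py | reorganize_the_array_linear
-- ===== SOURCE A (Python) =====
-- def reorganize_the_array_linear(arr):
--     """
--         This function reorganizes the array such that arr[i] = i, -1 otherwise in linear time complexity
--         Args:
--             arr: The list of elements
--         Returns:
--             The resultant array
--         """
--     n = len(arr)
--     elements = {}
--     for i in range(n):
--         elements[i] = -1
--     i = 0
--     while i < n:
--         if arr[i] != -1:
--             elements[arr[i]] = arr[i]
--         i += 1
--     for i in range(n):
--         arr[i] = elements[i]
--     return arr
-- ===== SOURCE B (Python) =====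
-- def reorganize_the_array_linear(arr):
--     n = len(arr)
--     for i in range(n):
--         while 0 <= arr[i] < n and arr[arr[i]] != arr[i]:
--             j = arr[i]
--             arr[i], arr[j] = arr[j], arr[i]
--     for i in range(n):
--         if arr[i] != i:
--             arr[i] = -1
--     return arr
-- ===== Notes on version B (the rewrite author's own statement) =====
-- stated objective: faster
-- what changed: Replaced A's dict-based table (pre-fill every index with -1, overwrite from the values, copy back) by an in-place cyclic sort: in-range values are routed to their own index by swapping, then one pass writes -1 wherever arr[i] != i; no auxiliary dict/set is kept.
import Mathlib
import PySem

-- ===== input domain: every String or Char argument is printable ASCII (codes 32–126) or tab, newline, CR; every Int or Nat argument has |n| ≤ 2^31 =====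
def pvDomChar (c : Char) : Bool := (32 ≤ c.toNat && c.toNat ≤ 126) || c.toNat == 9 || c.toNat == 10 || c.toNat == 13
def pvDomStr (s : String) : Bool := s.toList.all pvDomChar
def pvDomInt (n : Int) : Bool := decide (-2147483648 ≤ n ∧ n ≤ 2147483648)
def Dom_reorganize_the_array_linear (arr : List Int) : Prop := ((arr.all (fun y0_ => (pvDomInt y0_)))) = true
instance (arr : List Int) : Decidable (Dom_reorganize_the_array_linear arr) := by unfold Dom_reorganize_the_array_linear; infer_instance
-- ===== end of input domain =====

-- B replaces A's dict (pre-fill with -1, overwrite from the values, copy back) by an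
-- in-place cyclic sort: each in-range value is routed to its own index by swapping,
-- then a final pass writes -1 wherever arr[i] ≠ i.  Return-value equivalence is what
-- is proved: both Pythons also mutate the argument list in place to the same contents.

-- ===== PORT A =====
def reorganize_the_array_linear (arr : List Int) : List Int :=
  let n : Int := arr.length
  -- for i in range(n): elements[i] = -1
  let elements : PySem.Dict Int Int :=
    (PySem.List.pyRange 0 n 1).foldl (fun d i => d.insert i (-1)) PySem.Dict.empty
  -- while i < n: if arr[i] != -1: elements[arr[i]] = arr[i]   (index i is always in range)
  let elements :=
    (PySem.List.pyRange 0 n 1).foldl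
      (fun d i =>
        let v := PySem.List.pyGetD arr i 0
        if v ≠ -1 then d.insert v v else d) elements
  -- for i in range(n): arr[i] = elements[i]   (every key 0..n-1 is present, so no KeyError)
  (PySem.List.pyRange 0 n 1).map (fun i => elements.getD i 0)

-- ===== PORT B =====
-- number of already-placed positions (arr[p] == p); the while loop's termination measure
def pvFixedCount (l : List Int) : Nat :=
  (List.range l.length).countP (fun p => l.getD p 0 = (p : Int))

-- strict monotonicity of countP used by the termination proof of the while loop
theorem pvCountP_lt {α : Type} (l : List α) (P Q : α → Bool)
    (h1 : ∀ a ∈ l, P a → Q a) (x : α) (hx : x ∈ l) (h2 : ¬ P x) (h3 : Q x) :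
    l.countP P < l.countP Q := by
  induction l with
  | nil => cases hx
  | cons a as ih =>
    have hmono : as.countP P ≤ as.countP Q :=
      List.countP_mono_left (fun b hb => h1 b (List.mem_cons_of_mem a hb))
    rcases List.mem_cons.mp hx with rfl | hx'
    · have h2' : P x = false := by simpa using h2
      simp only [List.countP_cons, h2', h3, if_true, Bool.false_eq_true, if_false]
      omega
    · have := ih (fun b hb hp => h1 b (List.mem_cons_of_mem a hb) hp) hx'
      by_cases hPa : P a
      · have hQa : Q a := h1 a (List.mem_cons_self) hPa
        simp only [List.countP_cons, hPa, hQa, if_true]; omega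
      · simp only [List.countP_cons, hPa, if_false]
        by_cases hQa : Q a <;> simp [hQa] <;> omega

-- value of a two-write (swap) at any in-range position
theorem pvGetD_swap (l : List Int) (i t : Nat) (a b : Int) (p : Nat) (hp : p < l.length) :
    ((l.set i a).set t b).getD p 0
      = if t = p then b else if i = p then a else l.getD p 0 := by
  simp only [List.getD_eq_getElem?_getD, List.getElem?_set, List.length_set]
  by_cases h1 : t = p <;> by_cases h2 : i = p <;> simp_all

-- each swap of the while loop strictly increases the number of placed positions
theorem pvFixedCount_swap_lt (l : List Int) (i : Nat)
    (h : 0 ≤ l.getD i 0 ∧ l.getD i 0 < (l.length : Int) ∧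
         l.getD (l.getD i 0).toNat 0 ≠ l.getD i 0) :
    pvFixedCount l <
      pvFixedCount ((l.set i (l.getD (l.getD i 0).toNat 0)).set (l.getD i 0).toNat (l.getD i 0)) := by
  obtain ⟨h0, hlt, hne⟩ := h
  set v := l.getD i 0 with hv
  set t := v.toNat with ht
  have htv : (t : Int) = v := Int.toNat_of_nonneg h0
  have htn : t < l.length := by omega
  unfold pvFixedCount
  rw [show ((l.set i (l.getD t 0)).set t v).length = l.length by simp]
  refine pvCountP_lt _ _ _ ?_ t (List.mem_range.mpr htn) ?_ ?_
  · intro p hp hP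
    have hpn : p < l.length := List.mem_range.mp hp
    have hPe : l.getD p 0 = (p : Int) := by simpa using hP
    have hpt : t ≠ p := by
      rintro rfl; exact hne (hPe.trans htv)
    have hpi : i ≠ p := by
      intro he
      apply hne
      have hvp : v = (p : Int) := by rw [hv, he, hPe]
      have htp : t = p := by omega
      rw [htp, hPe, ← hvp]
    simp only [decide_eq_true_eq]
    rw [pvGetD_swap _ _ _ _ _ _ hpn, if_neg hpt, if_neg hpi]
    exact hPe
  · simpa using fun hc => hne (hc.trans htv)
  · simp only [decide_eq_true_eq]
    rw [pvGetD_swap _ _ _ _ _ _ htn, if_pos rfl]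
    exact htv.symm

-- the while loop: route the value at index i to its own position by repeated swapping
def pvCyclePlace (l : List Int) (i : Nat) : List Int :=
  let v := l.getD i 0
  if h : 0 ≤ v ∧ v < (l.length : Int) ∧ l.getD v.toNat 0 ≠ v then
    pvCyclePlace ((l.set i (l.getD v.toNat 0)).set v.toNat v) i
  else l
termination_by l.length - pvFixedCount l
decreasing_by
  have h1 := pvFixedCount_swap_lt l i h
  have h2 : pvFixedCount ((l.set i (l.getD (l.getD i 0).toNat 0)).set (l.getD i 0).toNat (l.getD i 0))
      ≤ l.length := by
    unfold pvFixedCount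
    calc _ ≤ (List.range ((l.set i (l.getD (l.getD i 0).toNat 0)).set (l.getD i 0).toNat (l.getD i 0)).length).length := List.countP_le_length
    _ = l.length := by simp
  simp only [List.length_set]
  omega

def reorganize_the_array_linear_alt (arr : List Int) : List Int :=
  -- for i in range(n): while 0 <= arr[i] < n and arr[arr[i]] != arr[i]: swap
  let placed := (List.range arr.length).foldl pvCyclePlace arr
  -- for i in range(n): if arr[i] != i: arr[i] = -1
  placed.mapIdx (fun i v => if v ≠ (i : Int) then -1 else v)

-- ===== PRECONDITION & SPEC =====
def Spec_reorganize_the_array_linear (arr : List Int) (out : List Int) : Prop := out = reorganize_the_array_linear_alt arr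
instance (arr : List Int) (out : List Int) : Decidable (Spec_reorganize_the_array_linear arr out) := by unfold Spec_reorganize_the_array_linear; infer_instance

-- ===== CLAIM (what is proved, stated in full; the proofs are below) =====
def Claim_equal_reorganize_the_array_linear : Prop := ∀ (arr : List Int), Dom_reorganize_the_array_linear arr → Spec_reorganize_the_array_linear arr (reorganize_the_array_linear arr)

-- ===== LEMMAS AND PROOFS =====

-- ---- A-side: the dict after the two loops ----

-- the pre-fill loop: every key seen by the loop maps to -1
theorem getD_foldl_insert_neg_one (l : List Int) (d : PySem.Dict Int Int) (k : Int) :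
    (l.foldl (fun d i => d.insert i (-1)) d).getD k 0
      = if k ∈ l then -1 else d.getD k 0 := by
  induction l generalizing d with
  | nil => simp
  | cons v rest ih =>
    simp only [List.foldl_cons, ih, List.mem_cons, PySem.Dict.getD_insert]
    by_cases hv : k = v <;> by_cases hr : k ∈ rest <;> simp [hv, hr]

-- the overwrite loop: key k ends at k iff k occurs in the values (and k ≠ -1)
theorem getD_foldl_overwrite (l : List Int) (d : PySem.Dict Int Int) (k : Int) :
    (l.foldl (fun d v => if v ≠ -1 then d.insert v v else d) d).getD k 0
      = if k ∈ l ∧ k ≠ -1 then k else d.getD k 0 := by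
  induction l generalizing d with
  | nil => simp
  | cons v rest ih =>
    simp only [List.foldl_cons, ih, List.mem_cons]
    by_cases hr : k ∈ rest ∧ k ≠ -1
    · simp [hr]
    · by_cases hv : v ≠ -1
      · simp only [if_pos hv, PySem.Dict.getD_insert, if_neg hr]
        by_cases hk : k = v
        · subst hk; simp [hv]
        · simp only [if_neg hk]
          rw [if_neg]; rintro ⟨hkm | hkm, hne⟩
          · exact hk hkm
          · exact hr ⟨hkm, hne⟩
      · simp only [ne_eq, not_not] at hv
        simp only [hv, ne_eq, not_true_eq_false, if_false, if_neg hr]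
        rw [if_neg]; rintro ⟨hkm | hkm, hne⟩
        · exact hne hkm
        · exact hr ⟨hkm, hne⟩

-- A's result, characterised: position k holds k iff k occurs in arr
theorem portA_characterisation (arr : List Int) :
    reorganize_the_array_linear arr
      = (PySem.List.pyRange 0 (arr.length : Int) 1).map
          (fun k => if k ∈ arr ∧ k ≠ -1 then k else -1) := by
  unfold reorganize_the_array_linear
  have hfold := PySem.List.foldl_pyRange_zero_pyGetD' arr 0
      (fun (d : PySem.Dict Int Int) (v : Int) => if v ≠ -1 then d.insert v v else d)
      ((PySem.List.pyRange 0 (arr.length : Int) 1).foldl (fun d i => d.insert i (-1)) PySem.Dict.empty)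
  simp only [hfold]
  apply List.map_congr_left
  intro k hk
  rw [PySem.List.mem_pyRange_one] at hk
  rw [getD_foldl_overwrite, getD_foldl_insert_neg_one]
  have hmem : k ∈ PySem.List.pyRange 0 (arr.length : Int) 1 := by
    rw [PySem.List.mem_pyRange_one]; exact hk
  by_cases h : k ∈ arr ∧ k ≠ -1
  · simp [h]
  · simp [h, hmem]

-- ---- B-side: properties of the cyclic-sort phase ----

theorem pvCyclePlace_length (l : List Int) (i : Nat) :
    (pvCyclePlace l i).length = l.length := by
  fun_induction pvCyclePlace l i with
  | case1 l v h ih => rw [ih]; simp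
  | case2 => rfl

-- a list-level swap is a permutation
theorem pvSwap_perm (l : List Int) (i j : Nat) (hi : i < l.length) (hj : j < l.length) :
    ((l.set i (l.getD j 0)).set j (l.getD i 0)).Perm l := by
  have h := Array.swap_perm (xs := l.toArray) (i := i) (j := j) (by simpa) (by simpa)
  rw [Array.perm_iff_toList_perm, Array.toList_swap] at h
  simpa [List.getD_eq_getElem?_getD, List.getElem?_eq_getElem, hi, hj] using h

theorem pvCyclePlace_perm (l : List Int) (i : Nat) (hi : i < l.length) :
    (pvCyclePlace l i).Perm l := by
  fun_induction pvCyclePlace l i with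
  | case1 l v h ih =>
    obtain ⟨h0, hlt, hne⟩ := h
    have htn : v.toNat < l.length := by omega
    exact (ih (by simpa using hi)).trans (pvSwap_perm l i v.toNat hi htn)
  | case2 => exact List.Perm.refl _

-- positions other than i are either untouched or set to their own index
theorem pvCyclePlace_getD_of_ne (l : List Int) (i : Nat) (p : Nat) (hp : p ≠ i) :
    (pvCyclePlace l i).getD p 0 = l.getD p 0 ∨ (pvCyclePlace l i).getD p 0 = (p : Int) := by
  fun_induction pvCyclePlace l i with
  | case1 l v h ih =>
    obtain ⟨h0, hlt, hne⟩ := h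
    rcases ih with hl | hr
    · rw [hl]
      by_cases hpn : p < l.length
      · rw [pvGetD_swap _ _ _ _ _ _ hpn]
        by_cases hpt : v.toNat = p
        · right; rw [if_pos hpt, ← hpt, Int.toNat_of_nonneg h0]
        · left; rw [if_neg hpt, if_neg (fun hip => hp hip.symm)]
      · left
        have hlen : ((l.set i (l.getD v.toNat 0)).set v.toNat v).length = l.length := by simp
        rw [List.getD_eq_default _ _ (by omega), List.getD_eq_default _ _ (by omega)]
    · right; exact hr
  | case2 => left; rfl

-- a placed position stays placed
theorem pvCyclePlace_fixed (l : List Int) (i : Nat) (q : Nat)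
    (hq : l.getD q 0 = (q : Int)) :
    (pvCyclePlace l i).getD q 0 = (q : Int) := by
  fun_induction pvCyclePlace l i with
  | case1 l v h ih =>
    obtain ⟨h0, hlt, hne⟩ := h
    have hqn : q < l.length := by
      by_contra hc
      rw [List.getD_eq_default _ _ (by omega)] at hq
      have : q = 0 := by omega
      omega
    have hqi : q ≠ i := by
      rintro rfl
      have hvq : v = (q : Int) := hq
      apply hne
      rw [show v.toNat = q by omega, hq, ← hvq]
    have hqt : v.toNat ≠ q := by
      rintro rfl; exact hne (by rw [hq, Int.toNat_of_nonneg h0])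
    exact ih (by rw [pvGetD_swap _ _ _ _ _ _ hqn, if_neg hqt, if_neg (fun h => hqi h.symm), hq])
  | case2 => exact hq

-- "done" at position p: the value there is out of range or already sits at its own index
def pvDone (l : List Int) (p : Nat) : Prop :=
  l.getD p 0 < 0 ∨ (l.length : Int) ≤ l.getD p 0 ∨ l.getD (l.getD p 0).toNat 0 = l.getD p 0

-- the while loop exits with its condition false: position i is done
theorem pvCyclePlace_done (l : List Int) (i : Nat) : pvDone (pvCyclePlace l i) i := by
  fun_induction pvCyclePlace l i with
  | case1 l v h ih => exact ih
  | case2 l v h =>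
    unfold pvDone
    push_neg at h
    by_cases h0 : l.getD i 0 < 0
    · exact Or.inl h0
    · push_neg at h0
      by_cases h1 : (l.length : Int) ≤ l.getD i 0
      · exact Or.inr (Or.inl h1)
      · push_neg at h1
        exact Or.inr (Or.inr (h h0 h1))

-- doneness of other positions is preserved by the while loop
theorem pvCyclePlace_done_pres (l : List Int) (i : Nat) (p : Nat)
    (hp : p < l.length) (hpi : p ≠ i) (hd : pvDone l p) :
    pvDone (pvCyclePlace l i) p := by
  have hlen := pvCyclePlace_length l i
  rcases pvCyclePlace_getD_of_ne l i p hpi with hsame | hself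
  · unfold pvDone
    rw [hsame, hlen]
    rcases hd with h0 | h1 | h2
    · exact Or.inl h0
    · exact Or.inr (Or.inl h1)
    · by_cases hs : l.getD p 0 < 0
      · exact Or.inl hs
      · push_neg at hs
        have hc : (((l.getD p 0).toNat : Nat) : Int) = l.getD p 0 := Int.toNat_of_nonneg hs
        have hfix := pvCyclePlace_fixed l i (l.getD p 0).toNat (by rw [h2, hc])
        exact Or.inr (Or.inr (by rw [hfix, hc]))
  · unfold pvDone
    rw [hself]
    exact Or.inr (Or.inr (by rw [Int.toNat_natCast, hself]))

-- the outer for-loop leaves every visited position done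
theorem pvFold_length (js : List Nat) (l : List Int) :
    (js.foldl pvCyclePlace l).length = l.length := by
  induction js generalizing l with
  | nil => rfl
  | cons j js ih => rw [List.foldl_cons, ih, pvCyclePlace_length]

theorem pvFold_perm (js : List Nat) (l : List Int) (h : ∀ j ∈ js, j < l.length) :
    (js.foldl pvCyclePlace l).Perm l := by
  induction js generalizing l with
  | nil => exact List.Perm.refl _
  | cons j js ih =>
    rw [List.foldl_cons]
    have hj : j < l.length := h j (List.mem_cons_self)
    have hlen := pvCyclePlace_length l j
    exact (ih _ (fun x hx => by rw [hlen]; exact h x (List.mem_cons_of_mem j hx))).trans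
      (pvCyclePlace_perm l j hj)

theorem pvFold_done (js : List Nat) (l : List Int) (hjs : ∀ j ∈ js, j < l.length)
    (p : Nat) (hp : p < l.length) (h : pvDone l p ∨ p ∈ js) :
    pvDone (js.foldl pvCyclePlace l) p := by
  induction js generalizing l with
  | nil => rw [List.foldl_nil]; exact h.resolve_right (by simp)
  | cons j js ih =>
    rw [List.foldl_cons]
    have hlen := pvCyclePlace_length l j
    refine ih _ (fun x hx => by rw [hlen]; exact hjs x (List.mem_cons_of_mem j hx)) (by omega) ?_
    by_cases hpj : p = j
    · subst hpj; exact Or.inl (pvCyclePlace_done l p)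
    · rcases h with hd | hmem
      · exact Or.inl (pvCyclePlace_done_pres l j p hp hpj hd)
      · rcases List.mem_cons.mp hmem with rfl | h' 
        · exact absurd rfl hpj
        · exact Or.inr h'

-- after the placement phase, position k holds k iff k occurs in arr
theorem pvPlaced_characterisation (arr : List Int) (k : Nat) (hk : k < arr.length) :
    ((List.range arr.length).foldl pvCyclePlace arr).getD k 0 = (k : Int)
      ↔ (k : Int) ∈ arr := by
  set placed := (List.range arr.length).foldl pvCyclePlace arr with hpl
  have hlen : placed.length = arr.length := pvFold_length _ _
  have hperm : placed.Perm arr := pvFold_perm _ _ (fun j hj => List.mem_range.mp hj)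
  constructor
  · intro h
    have hk' : k < placed.length := by omega
    have : placed.getD k 0 ∈ placed := by
      rw [List.getD_eq_getElem _ _ hk']; exact List.getElem_mem hk'
    rw [h] at this
    exact hperm.mem_iff.mp this
  · intro h
    have hmem : (k : Int) ∈ placed := hperm.mem_iff.mpr h
    obtain ⟨p, hp, hpe⟩ := List.mem_iff_getElem.mp hmem
    have hpn : p < arr.length := by omega
    have hd : pvDone placed p :=
      pvFold_done _ _ (fun j hj => List.mem_range.mp hj) p hpn
        (Or.inr (List.mem_range.mpr hpn))
    have hpv : placed.getD p 0 = (k : Int) := by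
      rw [List.getD_eq_getElem _ _ hp]; exact hpe
    rcases hd with h0 | h1 | h2
    · omega
    · rw [hpv, hlen] at h1; omega
    · rw [hpv, Int.toNat_natCast] at h2
      exact h2

-- ===== VERDICT (by name: the statement is the Claim_ definition above) =====
theorem reorganize_the_array_linear_spec : Claim_equal_reorganize_the_array_linear := by
  unfold Claim_equal_reorganize_the_array_linear
  intro arr _
  unfold Spec_reorganize_the_array_linear
  rw [portA_characterisation]
  unfold reorganize_the_array_linear_alt
  apply List.ext_getElem
  · simp [PySem.List.length_pyRange_one, pvFold_length]
  · intro i h1 h2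
    have hi : i < arr.length := by
      simpa [PySem.List.length_pyRange_one] using h1
    have hip : i < ((List.range arr.length).foldl pvCyclePlace arr).length := by
      rw [pvFold_length]; exact hi
    rw [List.getElem_map, List.getElem_mapIdx, PySem.List.getElem_pyRange_one]
    simp only [zero_add]
    have hkey := pvPlaced_characterisation arr i hi
    rw [List.getD_eq_getElem _ 0 hip] at hkey
    by_cases hmem : (i : Int) ∈ arr
    · have hv : ((List.range arr.length).foldl pvCyclePlace arr)[i]'hip = (i : Int) :=
        hkey.mpr hmem
      have hne : (i : Int) ≠ -1 := by omega
      simp [hv, hmem, hne]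
    · have hv : ((List.range arr.length).foldl pvCyclePlace arr)[i]'hip ≠ (i : Int) :=
        fun hc => hmem (hkey.mp hc)
      simp [hv, hmem]
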